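-- pv_equiv track=rewrite | github.com/MrBrantCode/unitest_baseline | mut_generate/mist_train_cf/cf_13614/solution.py | lcm_three_numbers
-- ===== SOURCE A (Python) =====
-- def lcm_three_numbers(a, b, c):
--     def gcd(a, b):
--         while b != 0:
--             a, b = b, a % b
--         return a
--
--     def lcm(a, b):
--         return (a * b) // gcd(a, b)
--
--     return lcm(lcm(a, b), c)
-- ===== SOURCE B (Python) =====
-- def lcm_three_numbers(a, b, c):
--     def gcd(x, y):
--         return x if y == 0 else gcd(y, x % y)
--
--     def lcm(x, y):
--         if x == 0 or y == 0:
--             return 0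
--         return x * (abs(y) // gcd(abs(x), abs(y)))
--
--     return lcm(lcm(a, b), c)
-- ===== Notes on version B (the rewrite author's own statement) =====
-- stated objective: alternative
-- what changed: Replaced the iterative signed Euclid plus unconditional (x*y)//gcd with a recursive gcd applied to absolute values and an lcm that short-circuits zero operands and computes x*(|y|//gcd(|x|,|y|)), which also makes the function total (0 instead of ZeroDivisionError).
import Mathlib
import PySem

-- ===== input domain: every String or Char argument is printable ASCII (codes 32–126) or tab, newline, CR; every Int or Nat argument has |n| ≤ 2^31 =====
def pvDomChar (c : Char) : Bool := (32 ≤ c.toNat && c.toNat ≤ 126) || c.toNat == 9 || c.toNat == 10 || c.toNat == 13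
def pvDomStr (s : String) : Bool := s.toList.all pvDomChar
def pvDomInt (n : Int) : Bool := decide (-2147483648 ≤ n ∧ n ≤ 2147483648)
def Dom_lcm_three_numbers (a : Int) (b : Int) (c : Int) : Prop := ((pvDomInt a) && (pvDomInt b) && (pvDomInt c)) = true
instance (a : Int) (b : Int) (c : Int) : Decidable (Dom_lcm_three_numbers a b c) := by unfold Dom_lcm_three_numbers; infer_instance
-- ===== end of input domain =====

-- B changes A's decomposition (recursive gcd on absolute values, lcm with explicit zero branches);
-- equivalence is claimed on Pre_, which excludes exactly the inputs where A raises ZeroDivisionError.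

-- termination fact for the Euclidean recursion (|a % b| < |b| for b ≠ 0, Python mod)
theorem pvModNatAbsLt (a b : Int) (hb : b ≠ 0) :
    (PySem.Int.mod a b).natAbs < b.natAbs := by
  rcases lt_or_gt_of_ne hb with h | h
  · have h1 := PySem.Int.mod_neg_bounds a h
    omega
  · have h1 := PySem.Int.mod_nonneg a h
    have h2 := PySem.Int.mod_lt a h
    omega

-- ===== PORT A =====
-- A's inner 'gcd': while b != 0: a, b = b, a % b; return a   (loop as the same-state recursion)
def pvGcdLoop (a b : Int) : Int :=
  if hb : b = 0 then a else pvGcdLoop b (PySem.Int.mod a b)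
termination_by b.natAbs
decreasing_by exact pvModNatAbsLt a b hb

-- A's 'lcm': (a * b) // gcd(a, b)
def pvLcmA (a b : Int) : Int := PySem.Int.floordiv (a * b) (pvGcdLoop a b)

def lcm_three_numbers (a : Int) (b : Int) (c : Int) : Int :=
  pvLcmA (pvLcmA a b) c

-- ===== PORT B =====
-- B's 'gcd': return x if y == 0 else gcd(y, x % y)
def pvGcdRec (x y : Int) : Int :=
  if hy : y = 0 then x else pvGcdRec y (PySem.Int.mod x y)
termination_by y.natAbs
decreasing_by exact pvModNatAbsLt x y hy

-- B's 'lcm': zero branch, else x * (abs(y) // gcd(abs(x), abs(y)))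
def pvLcmB (x y : Int) : Int :=
  if x = 0 ∨ y = 0 then 0
  else x * PySem.Int.floordiv |y| (pvGcdRec |x| |y|)

def lcm_three_numbers_alt (a : Int) (b : Int) (c : Int) : Int :=
  pvLcmB (pvLcmB a b) c

-- ===== PRECONDITION & SPEC =====
-- Pre_ excludes exactly the inputs on which A raises ZeroDivisionError (a zero gcd divisor):
-- a = b = 0, or c = 0 together with a = 0 or b = 0.
def Pre_lcm_three_numbers (a : Int) (b : Int) (c : Int) : Prop :=
  ¬(a = 0 ∧ b = 0) ∧ ¬((a = 0 ∨ b = 0) ∧ c = 0)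
instance (a : Int) (b : Int) (c : Int) : Decidable (Pre_lcm_three_numbers a b c) := by
  unfold Pre_lcm_three_numbers; infer_instance
def pvWitness_lcm_three_numbers : Int × Int × Int := (4, 6, 10)

def Spec_lcm_three_numbers (a : Int) (b : Int) (c : Int) (out : Int) : Prop :=
  out = lcm_three_numbers_alt a b c
instance (a : Int) (b : Int) (c : Int) (out : Int) : Decidable (Spec_lcm_three_numbers a b c out) := by
  unfold Spec_lcm_three_numbers; infer_instance

-- ===== CLAIM (what is proved, stated in full; the proofs are below) =====
def Claim_equal_lcm_three_numbers : Prop := ∀ (a : Int) (b : Int) (c : Int), Dom_lcm_three_numbers a b c → Pre_lcm_three_numbers a b c → Spec_lcm_three_numbers a b c (lcm_three_numbers a b c)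

-- ===== LEMMAS AND PROOFS =====

-- Python-mod Euclid: gcd is invariant under one step
theorem pvGcdStep (a b : Int) :
    Int.gcd b (PySem.Int.mod a b) = Int.gcd a b := by
  have h := PySem.Int.floordiv_mul_add_mod a b
  have : PySem.Int.mod a b = a + -(PySem.Int.floordiv a b) * b := by linarith
  rw [this, Int.gcd_add_mul_right_right, Int.gcd_comm]

-- a nonzero Python mod has the sign of the divisor
theorem pvModSign (a b : Int) (hb : b ≠ 0) (hm : PySem.Int.mod a b ≠ 0) :
    (PySem.Int.mod a b).sign = b.sign := by
  rcases lt_or_gt_of_ne hb with h | h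
  · have h1 := PySem.Int.mod_neg_bounds a h
    have : PySem.Int.mod a b < 0 := lt_of_le_of_ne h1.2 hm
    rw [Int.sign_eq_neg_one_of_neg this, Int.sign_eq_neg_one_of_neg h]
  · have h1 := PySem.Int.mod_nonneg a h
    have : 0 < PySem.Int.mod a b := lt_of_le_of_ne h1 (Ne.symm hm)
    rw [Int.sign_eq_one_of_pos this, Int.sign_eq_one_of_pos h]

-- closed form of A's iterative gcd on a nonzero second argument
theorem pvGcdLoopEq : ∀ (a b : Int), b ≠ 0 → pvGcdLoop a b = b.sign * Int.gcd a b := by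
  intro a b
  induction a, b using pvGcdLoop.induct with
  | case1 a => intro hb; exact absurd rfl hb
  | case2 a b h ih =>
    intro _
    rw [pvGcdLoop, dif_neg h]
    by_cases hm : PySem.Int.mod a b = 0
    · rw [hm, pvGcdLoop, dif_pos rfl]
      have hd : b ∣ a := (PySem.Int.mod_eq_zero_iff_dvd a b).mp hm
      have : Int.gcd a b = b.natAbs := by
        rw [Int.gcd_comm]; exact Int.gcd_eq_natAbs_left hd
      rw [this, Int.natCast_natAbs, Int.sign_mul_abs]
    · rw [ih hm, pvModSign a b h hm, pvGcdStep]

-- B's recursive gcd is the same recursion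
theorem pvGcdRecEq : ∀ (x y : Int), y ≠ 0 → pvGcdRec x y = y.sign * Int.gcd x y := by
  intro x y
  induction x, y using pvGcdRec.induct with
  | case1 x => intro hy; exact absurd rfl hy
  | case2 x y h ih =>
    intro _
    rw [pvGcdRec, dif_neg h]
    by_cases hm : PySem.Int.mod x y = 0
    · rw [hm, pvGcdRec, dif_pos rfl]
      have hd : y ∣ x := (PySem.Int.mod_eq_zero_iff_dvd x y).mp hm
      have : Int.gcd x y = y.natAbs := by
        rw [Int.gcd_comm]; exact Int.gcd_eq_natAbs_left hd
      rw [this, Int.natCast_natAbs, Int.sign_mul_abs]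
    · rw [ih hm, pvModSign x y h hm, pvGcdStep]

-- exact floor division: (d * k) // d = k for d ≠ 0 (any sign convention agrees on exact quotients)
theorem pvFloordivMulCancel (d k : Int) (hd : d ≠ 0) :
    PySem.Int.floordiv (d * k) d = k := by
  have h := PySem.Int.floordiv_mul_add_mod (d * k) d
  have hm : PySem.Int.mod (d * k) d = 0 :=
    (PySem.Int.mod_eq_zero_iff_dvd (d * k) d).mpr ⟨k, rfl⟩
  rw [hm, add_zero] at h
  have := mul_right_cancel₀ hd (h.trans (mul_comm d k))
  exact this

-- one lcm step: A's floordiv formula equals B's branching formula, when the gcd divisor is nonzero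
theorem pvLcmStep (x y : Int) (h : ¬(x = 0 ∧ y = 0)) : pvLcmA x y = pvLcmB x y := by
  by_cases hy : y = 0
  · have hx : x ≠ 0 := by tauto
    unfold pvLcmA pvLcmB
    rw [hy, if_pos (Or.inr rfl)]
    rw [pvGcdLoop, dif_pos rfl]
    simpa using pvFloordivMulCancel x 0 hx
  · by_cases hx : x = 0
    · unfold pvLcmA pvLcmB
      rw [if_pos (Or.inl hx), hx]
      rw [pvGcdLoopEq 0 y hy]
      have hg : (Int.gcd 0 y : Int) = |y| := by
        rw [Int.gcd_zero_left, Int.natCast_natAbs]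
      rw [hg]
      have hne : y.sign * |y| ≠ 0 := by rw [Int.sign_mul_abs]; exact hy
      simpa using pvFloordivMulCancel (y.sign * |y|) 0 hne
    · -- both nonzero
      unfold pvLcmA pvLcmB
      rw [if_neg (by tauto)]
      rw [pvGcdLoopEq x y hy]
      have hyabs : |y| ≠ 0 := by simpa using hy
      rw [pvGcdRecEq |x| |y| hyabs]
      have hgabs : Int.gcd |x| |y| = Int.gcd x y := by
        simp [Int.gcd, Int.natAbs_abs]
      have hsy : (|y|).sign = 1 := Int.sign_eq_one_of_pos (abs_pos.mpr hy)
      rw [hsy, hgabs, one_mul]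
      set g : Int := (Int.gcd x y : Int) with hgdef
      have hgpos : 0 < g := by
        have : Int.gcd x y ≠ 0 := by
          simp [Int.gcd_eq_zero_iff, hx, hy]
        positivity
      have hgy : g ∣ y := Int.gcd_dvd_right x y
      have hgyabs : g ∣ |y| := (dvd_abs g y).mpr hgy
      obtain ⟨k, hk⟩ := hgyabs
      rw [hk, pvFloordivMulCancel g k (ne_of_gt hgpos)]
      -- A side: (x * y) // (y.sign * g) = x * k
      have hxy : x * y = (y.sign * g) * (x * k) := by
        have h1 : y.sign * |y| = y := Int.sign_mul_abs y
        calc x * y = x * (y.sign * |y|) := by rw [h1]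
          _ = x * (y.sign * (g * k)) := by rw [hk]
          _ = (y.sign * g) * (x * k) := by ring
      rw [hxy]
      have hne : y.sign * g ≠ 0 := by
        have : y.sign ≠ 0 := by
          rcases lt_or_gt_of_ne hy with hneg | hpos
          · simp [Int.sign_eq_neg_one_of_neg hneg]
          · simp [Int.sign_eq_one_of_pos hpos]
        exact mul_ne_zero this (ne_of_gt hgpos)
      exact pvFloordivMulCancel (y.sign * g) (x * k) hne

-- B's lcm is zero exactly when an operand is zero
theorem pvLcmBZero (x y : Int) (hx : x ≠ 0) (hy : y ≠ 0) : pvLcmB x y ≠ 0 := by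
  unfold pvLcmB
  rw [if_neg (by tauto)]
  have hyabs : |y| ≠ 0 := by simpa using hy
  rw [pvGcdRecEq |x| |y| hyabs]
  have hgabs : Int.gcd |x| |y| = Int.gcd x y := by simp [Int.gcd, Int.natAbs_abs]
  have hsy : (|y|).sign = 1 := Int.sign_eq_one_of_pos (abs_pos.mpr hy)
  rw [hsy, hgabs, one_mul]
  set g : Int := (Int.gcd x y : Int) with hgdef
  have hgpos : 0 < g := by
    have : Int.gcd x y ≠ 0 := by simp [Int.gcd_eq_zero_iff, hx, hy]
    positivity
  have hgy : g ∣ |y| := (dvd_abs g y).mpr (Int.gcd_dvd_right x y)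
  obtain ⟨k, hk⟩ := hgy
  rw [hk, pvFloordivMulCancel g k (ne_of_gt hgpos)]
  have hk0 : k ≠ 0 := by
    intro h0; rw [h0, mul_zero] at hk
    exact hy (abs_eq_zero.mp hk)
  exact mul_ne_zero hx hk0

-- ===== VERDICT (by name: the statement is the Claim_ definition above) =====
theorem lcm_three_numbers_spec : Claim_equal_lcm_three_numbers := by
  intro a b c _ hpre
  obtain ⟨h1, h2⟩ := hpre
  unfold Spec_lcm_three_numbers lcm_three_numbers lcm_three_numbers_alt
  rw [pvLcmStep a b h1]
  by_cases hc : c = 0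
  · have hab : a ≠ 0 ∧ b ≠ 0 := by tauto
    exact pvLcmStep (pvLcmB a b) c (by
      intro ⟨hl, _⟩
      exact pvLcmBZero a b hab.1 hab.2 hl)
  · exact pvLcmStep (pvLcmB a b) c (by tauto)
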